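-- pv_equiv track=rewrite | github.com/Kongtsey/RCSCPrep | JSONConverter/classifierQuestions.py | finder3
-- ===== SOURCE A (Python) =====
-- def finder3(list,x):
--     """
--     function to get only the choices and returns them
--     :param list: list with all of the questions and choices
--     :param x: argument where the choices begin
--     :return: only the choices for each question.
--     """
--     for i in range(len(list)):
--         if list[i][0:2]==x:
--             temp = []
--             for y in range(i,-1,-1):
--                 temp.append(list[y])
--                 if list[y][0:2] == 'A.':
--                     return (temp)
-- ===== SOURCE B (Python) =====
-- def finder3(list, x):
--     """Single forward pass tracking the index of the most recent 'A.'-prefixed entry."""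
--     lastA = None
--     for i in range(len(list)):
--         if list[i][0:2] == 'A.':
--             lastA = i
--         if list[i][0:2] == x and lastA is not None:
--             out = list[lastA:i + 1]
--             out.reverse()
--             return out
--     return None
-- ===== Notes on version B (the rewrite author's own statement) =====
-- stated objective: alternative
-- what changed: Replaces the nested backward scan (for each forward match, rescan back to the nearest 'A.') with one forward pass that maintains lastA, the index of the most recent 'A.'-prefixed entry, and returns list[lastA:i+1] reversed at the first usable match.
import Mathlib
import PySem

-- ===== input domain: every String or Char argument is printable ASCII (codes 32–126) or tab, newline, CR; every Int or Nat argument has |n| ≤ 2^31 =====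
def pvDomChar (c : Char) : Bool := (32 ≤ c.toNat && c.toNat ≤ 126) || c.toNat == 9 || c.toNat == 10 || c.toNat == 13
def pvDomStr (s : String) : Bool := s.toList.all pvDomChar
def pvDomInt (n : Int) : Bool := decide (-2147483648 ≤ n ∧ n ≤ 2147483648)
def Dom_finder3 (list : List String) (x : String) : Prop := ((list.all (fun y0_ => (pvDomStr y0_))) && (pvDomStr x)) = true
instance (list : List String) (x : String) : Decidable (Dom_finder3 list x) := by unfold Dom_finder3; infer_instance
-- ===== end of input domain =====

-- B replaces A's nested backward rescan by one forward pass carrying the index of the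
-- most recent 'A.'-prefixed entry; equal return values, proved below.

-- ===== PORT A =====
-- inner loop: 'for y in range(i,-1,-1): temp.append(list[y]); if list[y][0:2]=="A.": return temp'
def finder3Inner (l : List String) : Nat → List String → Option (List String)
  | y, temp =>
    let temp := temp ++ [l.getD y ""]
    if PySem.Str.slice (l.getD y "") (some 0) (some 2) = "A." then some temp
    else match y with
      | 0 => none
      | y' + 1 => finder3Inner l y' temp

-- outer loop over i in range(len(list)); a fruitless inner loop falls through to the next i
def finder3Outer (l : List String) (x : String) : List Nat → Option (List String)
  | [] => none
  | i :: rest =>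
    if PySem.Str.slice (l.getD i "") (some 0) (some 2) = x then
      match finder3Inner l i [] with
      | some t => some t
      | none => finder3Outer l x rest
    else finder3Outer l x rest

def finder3 (list : List String) (x : String) : Option (List String) :=
  finder3Outer list x (List.range list.length)

-- ===== PORT B =====
-- single forward pass; lastA = index of the most recent entry with prefix 'A.'
def finder3AltGo (l : List String) (x : String) : List Nat → Option Nat → Option (List String)
  | [], _ => none
  | i :: rest, lastA =>
    let lastA := if PySem.Str.slice (l.getD i "") (some 0) (some 2) = "A." then some i else lastA
    if PySem.Str.slice (l.getD i "") (some 0) (some 2) = x then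
      match lastA with
      | some j => some (PySem.List.slice l (some (j : Int)) (some ((i + 1 : Nat) : Int))).reverse
      | none => finder3AltGo l x rest lastA
    else finder3AltGo l x rest lastA

def finder3_alt (list : List String) (x : String) : Option (List String) :=
  finder3AltGo list x (List.range list.length) none

-- ===== PRECONDITION & SPEC =====
def Spec_finder3 (list : List String) (x : String) (out : Option (List String)) : Prop := out = finder3_alt list x
instance (list : List String) (x : String) (out : Option (List String)) : Decidable (Spec_finder3 list x out) := by unfold Spec_finder3; infer_instance

-- ===== CLAIM (what is proved, stated in full; the proofs are below) =====
def Claim_equal_finder3 : Prop := ∀ (list : List String) (x : String), Dom_finder3 list x → Spec_finder3 list x (finder3 list x)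

-- ===== LEMMAS AND PROOFS =====

-- index (as Option) of the last entry with prefix 'A.' among l[0..i-1]
def lastAUpto (l : List String) : Nat → Option Nat
  | 0 => none
  | i + 1 =>
    if PySem.Str.slice (l.getD i "") (some 0) (some 2) = "A." then some i else lastAUpto l i

theorem lastAUpto_lt (l : List String) (i : Nat) :
    ∀ j, lastAUpto l i = some j → j < i := by
  induction i with
  | zero => intro j h; simp [lastAUpto] at h
  | succ i ih =>
    intro j h
    unfold lastAUpto at h
    split at h
    · cases h; omega
    · exact Nat.lt_succ_of_lt (ih j h)

-- characterisation of A's backward scan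
theorem getD_eq_getElem' (l : List String) (i : Nat) (hi : i < l.length) :
    l.getD i "" = l[i] := by
  simp [List.getD, List.getElem?_eq_getElem hi]

theorem take_one_drop (l : List String) (i : Nat) (hi : i < l.length) :
    (l.drop i).take 1 = [l[i]] := by
  rw [List.drop_eq_getElem_cons hi, List.take_succ_cons, List.take_zero]

theorem finder3Inner_eq (l : List String) :
    ∀ (y : Nat) (temp : List String), y < l.length →
      finder3Inner l y temp =
        match lastAUpto l (y + 1) with
        | some j => some (temp ++ ((l.drop j).take (y + 1 - j)).reverse)
        | none => none := by
  intro y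
  induction y with
  | zero =>
    intro temp hy
    unfold finder3Inner
    by_cases h : PySem.Str.slice (l.getD 0 "") (some 0) (some 2) = "A."
    · have hl : lastAUpto l 1 = some 0 := by
        conv_lhs => rw [lastAUpto]
        rw [if_pos h]
      rw [if_pos h, hl]
      have h0 := take_one_drop l 0 hy
      simp only [List.drop_zero] at h0
      simp [h0, List.getD, List.getElem?_eq_getElem hy]
    · have hl : lastAUpto l 1 = none := by
        conv_lhs => rw [lastAUpto]
        rw [if_neg h]
        rfl
      rw [if_neg h, hl]
  | succ y ih =>
    intro temp hy
    unfold finder3Inner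
    show (if PySem.Str.slice (l.getD (y+1) "") (some 0) (some 2) = "A."
          then some (temp ++ [l.getD (y+1) ""]) else finder3Inner l y (temp ++ [l.getD (y+1) ""])) = _
    by_cases h : PySem.Str.slice (l.getD (y+1) "") (some 0) (some 2) = "A."
    · have hl : lastAUpto l (y + 2) = some (y + 1) := by
        conv_lhs => rw [lastAUpto]
        rw [if_pos h]
      rw [if_pos h, hl]
      have h2 : y + 1 + 1 - (y + 1) = 1 := by omega
      simp only [h2, take_one_drop l (y+1) hy, getD_eq_getElem' l (y+1) hy, List.reverse_singleton]
    · have hl : lastAUpto l (y + 2) = lastAUpto l (y + 1) := by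
        conv_lhs => rw [lastAUpto]
        rw [if_neg h]
      rw [if_neg h, hl, ih (temp ++ [l.getD (y+1) ""]) (by omega)]
      cases hcase : lastAUpto l (y + 1) with
      | none => rfl
      | some j =>
        have hj : j < y + 1 := lastAUpto_lt l (y+1) j hcase
        simp only []
        congr 1
        have hsplit : (l.drop j).take (y + 2 - j) = (l.drop j).take (y + 1 - j) ++ [l.getD (y+1) ""] := by
          have h1 : y + 2 - j = (y + 1 - j) + 1 := by omega
          rw [h1, List.take_add_one]
          congr 1
          have hidx : (l.drop j)[y + 1 - j]? = some l[y+1] := by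
            rw [List.getElem?_drop]
            have h3 : j + (y + 1 - j) = y + 1 := by omega
            rw [h3]
            exact List.getElem?_eq_getElem hy
          rw [hidx, getD_eq_getElem' l (y+1) hy]
          rfl
        rw [hsplit]
        simp

-- B's lastA update matches lastAUpto's step
theorem lastA_step (l : List String) (i : Nat) (acc : Option Nat) (hacc : acc = lastAUpto l i) :
    (if PySem.Str.slice (l.getD i "") (some 0) (some 2) = "A." then some i else acc) = lastAUpto l (i + 1) := by
  unfold lastAUpto; rw [hacc]

-- main loop equivalence
theorem loop_eq (l : List String) (x : String) :
    ∀ (k i : Nat), i + k = l.length →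
      finder3Outer l x (List.range' i k) = finder3AltGo l x (List.range' i k) (lastAUpto l i) := by
  intro k
  induction k with
  | zero => intro i _; simp [finder3Outer, finder3AltGo]
  | succ k ih =>
    intro i hik
    have hi : i < l.length := by omega
    rw [List.range'_succ]
    show finder3Outer l x (i :: List.range' (i+1) k) = _
    unfold finder3Outer finder3AltGo
    rw [lastA_step l i (lastAUpto l i) rfl]
    by_cases hx : PySem.Str.slice (l.getD i "") (some 0) (some 2) = x
    · rw [if_pos hx, if_pos hx]
      rw [finder3Inner_eq l i [] hi]
      cases hcase : lastAUpto l (i + 1) with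
      | none =>
        have h2 := ih (i+1) (by omega)
        rw [hcase] at h2
        exact h2
      | some j =>
        have hs : PySem.List.slice l (some (j : Int)) (some ((i : Int) + 1)) = (l.drop j).take (i + 1 - j) := by
          simpa using PySem.List.slice_natCast l j (i + 1)
        simp [hs]
    · rw [if_neg hx, if_neg hx]
      exact ih (i+1) (by omega)

-- ===== VERDICT (by name: the statement is the Claim_ definition above) =====
theorem finder3_spec : Claim_equal_finder3 := by
  intro l x _
  unfold Spec_finder3 finder3 finder3_alt
  have := loop_eq l x l.length 0 (by omega)
  simpa [List.range_eq_range', lastAUpto] using this
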